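-- pv_equiv track=rewrite | github.com/mhalushka/miRge3.0 | mirge/libs/trnaFragments.py | coordinate
-- ===== SOURCE A (Python) =====
-- def coordinate(dashedSeq):
--     startPos = 1
--     for i in dashedSeq:
--         if i != '-':
--             break
--         else:
--             startPos = startPos + 1
--     endPosTmp = 0
--     for i in dashedSeq[::-1]:
--         if i != '-':
--             break
--         else:
--             endPosTmp = endPosTmp + 1
--     endPos = len(dashedSeq) - endPosTmp
--     return (startPos, endPos)
-- ===== SOURCE B (Python) =====
-- def coordinate(dashedSeq):
--     first = None
--     last = None
--     for i, c in enumerate(dashedSeq):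
--         if c != '-':
--             if first is None:
--                 first = i
--             last = i
--     if first is None:
--         return (len(dashedSeq) + 1, 0)
--     return (first + 1, last + 1)
-- ===== Notes on version B (the rewrite author's own statement) =====
-- stated objective: alternative
-- what changed: Replaced A's two scans (a forward loop counting leading dashes plus a loop over the reversed string counting trailing dashes) by one forward pass with enumerate that records the first and the last non-dash index.
import Mathlib
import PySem

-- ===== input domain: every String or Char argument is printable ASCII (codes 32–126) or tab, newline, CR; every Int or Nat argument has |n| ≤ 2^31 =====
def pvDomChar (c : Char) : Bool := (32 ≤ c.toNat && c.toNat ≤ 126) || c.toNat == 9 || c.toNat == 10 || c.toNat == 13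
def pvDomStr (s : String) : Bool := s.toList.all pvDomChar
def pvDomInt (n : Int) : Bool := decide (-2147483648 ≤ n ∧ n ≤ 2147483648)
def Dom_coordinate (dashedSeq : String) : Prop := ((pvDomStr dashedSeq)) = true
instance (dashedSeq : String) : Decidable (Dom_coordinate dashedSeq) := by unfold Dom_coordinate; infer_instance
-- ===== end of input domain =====

-- B replaces A's two scans (forward + reversed) by one forward enumerate pass tracking the
-- first and last non-dash index (objective: alternative decomposition, same cost).

-- ===== PORT A =====
-- A's two for-loops have the same shape: count while the char is '-', break otherwise.
def pvCountLoop (acc : Int) : List Char → Int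
  | [] => acc
  | c :: cs => if c ≠ '-' then acc else pvCountLoop (acc + 1) cs

def coordinate (dashedSeq : String) : Int × Int :=
  let startPos := pvCountLoop 1 dashedSeq.toList
  let endPosTmp := pvCountLoop 0 dashedSeq.toList.reverse   -- dashedSeq[::-1]
  let endPos := (dashedSeq.toList.length : Int) - endPosTmp
  (startPos, endPos)

-- ===== PORT B =====
def pvStep (st : Option Int × Option Int) (p : Int × Char) : Option Int × Option Int :=
  if p.2 ≠ '-' then
    ((match st.1 with | none => some p.1 | some x => some x), some p.1)
  else st

def coordinate_alt (dashedSeq : String) : Int × Int :=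
  match (PySem.List.enumerate dashedSeq.toList 0).foldl pvStep (none, none) with
  | (some f, some lst) => (f + 1, lst + 1)
  | _ => ((dashedSeq.toList.length : Int) + 1, 0)

-- ===== PRECONDITION & SPEC =====
def Spec_coordinate (dashedSeq : String) (out : Int × Int) : Prop := out = coordinate_alt dashedSeq
instance (dashedSeq : String) (out : Int × Int) : Decidable (Spec_coordinate dashedSeq out) := by unfold Spec_coordinate; infer_instance

-- ===== CLAIM (what is proved, stated in full; the proofs are below) =====
def Claim_equal_coordinate : Prop := ∀ (dashedSeq : String), Dom_coordinate dashedSeq → Spec_coordinate dashedSeq (coordinate dashedSeq)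

-- ===== LEMMAS AND PROOFS =====

-- number of leading dashes
def pvLead (l : List Char) : Nat := (l.takeWhile (· == '-')).length

theorem pvCountLoop_eq (l : List Char) : ∀ acc : Int, pvCountLoop acc l = acc + (pvLead l : Int) := by
  induction l with
  | nil => intro acc; simp [pvCountLoop, pvLead]
  | cons c cs ih =>
    intro acc
    by_cases h : c = '-'
    · simp only [pvCountLoop, h, ne_eq, not_true_eq_false, if_false, ih, pvLead,
        List.takeWhile_cons, beq_self_eq_true, if_true, List.length_cons]
      push_cast
      ring
    · simp [pvCountLoop, pvLead, h]

theorem pvLead_all (l : List Char) (h : l.all (· == '-')) : pvLead l = l.length := by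
  unfold pvLead
  rw [List.takeWhile_eq_self_iff.mpr]
  intro a ha
  exact List.all_eq_true.mp h a ha

theorem pvTW_append_not {p : Char → Bool} (xs ys : List Char) (h : ∃ a ∈ xs, ¬ p a = true) :
    (xs ++ ys).takeWhile p = xs.takeWhile p := by
  rw [List.takeWhile_append, if_neg]
  intro hlen
  have heq : xs.takeWhile p = xs := (List.takeWhile_prefix p).eq_of_length hlen
  rcases h with ⟨a, ha, hna⟩
  exact hna (List.mem_takeWhile_imp (heq ▸ ha))

theorem pvTW_append_all {p : Char → Bool} (xs ys : List Char) (h : ∀ a ∈ xs, p a = true) :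
    (xs ++ ys).takeWhile p = xs ++ ys.takeWhile p := by
  rw [List.takeWhile_append, if_pos]
  rw [List.takeWhile_eq_self_iff.mpr h]

theorem pvLead_rev_notall (c : Char) (cs : List Char) (hcs : ¬ cs.all (· == '-') = true) :
    pvLead (c :: cs).reverse = pvLead cs.reverse := by
  have hmem : ∃ a ∈ cs.reverse, ¬ (a == '-') = true := by
    simp only [List.all_eq_true, not_forall] at hcs
    rcases hcs with ⟨a, ha, hna⟩
    exact ⟨a, List.mem_reverse.mpr ha, hna⟩
  unfold pvLead
  rw [List.reverse_cons, pvTW_append_not _ _ hmem]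

theorem pvFold_char (l : List Char) : ∀ (k : Int) (f0 l0 : Option Int),
    (PySem.List.enumerate l k).foldl pvStep (f0, l0) =
      if l.all (· == '-') then (f0, l0)
      else ((match f0 with | none => some (k + (pvLead l : Int)) | some x => some x),
            some (k + (l.length : Int) - 1 - (pvLead l.reverse : Int))) := by
  induction l with
  | nil => intro k f0 l0; simp [PySem.List.enumerate_nil]
  | cons c cs ih =>
    intro k f0 l0
    rw [PySem.List.enumerate_cons, List.foldl_cons]
    by_cases hc : c = '-'
    · -- dash: state unchanged, recurse
      have hstep : pvStep (f0, l0) (k, c) = (f0, l0) := by simp [pvStep, hc]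
      rw [hstep, ih]
      by_cases hall : cs.all (· == '-')
      · have hall2 : (c :: cs).all (· == '-') = true := by simp [hc, hall]
        rw [if_pos hall, if_pos hall2]
      · have hall' : ¬ (c :: cs).all (· == '-') = true := by simp [hc, hall]
        rw [if_neg hall, if_neg hall']
        have hlead : pvLead (c :: cs) = pvLead cs + 1 := by
          simp [pvLead, hc]
        have hrev : pvLead (c :: cs).reverse = pvLead cs.reverse := pvLead_rev_notall c cs hall
        rw [hlead, hrev]
        cases f0 <;> simp [Prod.ext_iff] <;> omega
    · -- non-dash
      have hall' : ¬ (c :: cs).all (· == '-') = true := by simp [hc]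
      have hstep : pvStep (f0, l0) (k, c) =
          ((match f0 with | none => some k | some x => some x), some k) := by
        simp [pvStep, hc]
      rw [hstep, ih]
      have hleadc : pvLead (c :: cs) = 0 := by simp [pvLead, hc]
      by_cases hall : cs.all (· == '-')
      · have hrev : pvLead (c :: cs).reverse = cs.length := by
          unfold pvLead
          rw [List.reverse_cons, pvTW_append_all]
          · simp [hc]
          · intro a ha
            exact List.all_eq_true.mp hall a (List.mem_reverse.mp ha)
        rw [if_pos hall, if_neg hall', hleadc, hrev]
        cases f0 <;> simp [Prod.ext_iff] <;> omega
      · have hrev : pvLead (c :: cs).reverse = pvLead cs.reverse := pvLead_rev_notall c cs hall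
        rw [if_neg hall, if_neg hall', hleadc, hrev]
        cases f0 <;> simp [Prod.ext_iff] <;> omega

-- ===== VERDICT (by name: the statement is the Claim_ definition above) =====
theorem coordinate_spec : Claim_equal_coordinate := by
  intro s _
  unfold Spec_coordinate coordinate coordinate_alt
  dsimp only
  rw [pvFold_char]
  by_cases hall : s.toList.all (· == '-')
  · have h1 := pvLead_all _ hall
    have h2 : pvLead s.toList.reverse = s.toList.length := by
      rw [pvLead_all]
      · simp
      · simp only [List.all_eq_true] at hall ⊢
        intro a ha; exact hall a (List.mem_reverse.mp ha)
    rw [if_pos hall]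
    dsimp only
    simp only [pvCountLoop_eq, h1, h2, Prod.ext_iff]
    constructor <;> ring
  · rw [if_neg hall]
    dsimp only
    simp only [pvCountLoop_eq, Prod.ext_iff]
    constructor <;> ring
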